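-- pv_equiv track=rewrite | github.com/arc-web/discord-manager | event_ops/pod_manager.py | _pick_leader
-- ===== SOURCE A (Python) =====
-- def _pick_leader(members: list[dict]) -> dict:
--     """Pick pod leader: prefer subscription-level Mac user, then subscription, then first."""
--     # subscription + mac
--     for m in members:
--         if m.get("experience_level") == "subscription" and m.get("os", "").lower() == "mac":
--             return m
--     # subscription
--     for m in members:
--         if m.get("experience_level") == "subscription":
--             return m
--     # first member
--     return members[0] if members else {}
-- ===== SOURCE B (Python) =====
-- def _pick_leader(members: list[dict]) -> dict:
--     """Score every member and take the first member with the maximal score: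
--     2 = subscription Mac user, 1 = subscription, 0 = anyone else."""
--     if not members:
--         return {}
--
--     def rank(m: dict) -> int:
--         if m.get("experience_level") != "subscription":
--             return 0
--         return 2 if m.get("os", "").lower() == "mac" else 1
--
--     return max(members, key=rank)
-- ===== Notes on version B (the rewrite author's own statement) =====
-- stated objective: simpler
-- what changed: Replaced A's two staged scans plus first-element fallback by a numeric rank (2 sub+mac, 1 sub, 0 other) and a single max-by-key selection, which returns the first member of maximal rank.
import Mathlib
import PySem

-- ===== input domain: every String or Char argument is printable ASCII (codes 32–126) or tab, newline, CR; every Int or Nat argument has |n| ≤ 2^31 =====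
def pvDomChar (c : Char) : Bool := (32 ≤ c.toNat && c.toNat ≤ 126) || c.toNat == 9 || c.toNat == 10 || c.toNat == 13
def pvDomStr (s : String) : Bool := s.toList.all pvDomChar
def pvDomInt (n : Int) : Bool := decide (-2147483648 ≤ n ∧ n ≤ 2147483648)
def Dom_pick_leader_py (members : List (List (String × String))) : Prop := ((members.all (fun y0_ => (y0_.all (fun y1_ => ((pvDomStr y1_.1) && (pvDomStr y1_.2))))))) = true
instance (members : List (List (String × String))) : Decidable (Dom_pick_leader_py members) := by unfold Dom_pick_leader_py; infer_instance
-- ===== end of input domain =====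

-- ===== PORT A =====
-- B changes the decomposition only: a rank function + max-by-key instead of A's staged scans ("simpler").
-- m.get("experience_level") == "subscription"
def pvIsSub (m : List (String × String)) : Bool :=
  (PySem.Dict.mk m).get? "experience_level" == some "subscription"

-- m.get("os", "").lower() == "mac"
def pvIsMac (m : List (String × String)) : Bool :=
  PySem.Str.lower ((PySem.Dict.mk m).getD "os" "") == "mac"

-- A's first loop: return first subscription+mac member
def pvScanSubMac : List (List (String × String)) → Option (List (String × String))
  | [] => none
  | m :: rest => if pvIsSub m && pvIsMac m then some m else pvScanSubMac rest

-- A's second loop: return first subscription member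
def pvScanSub : List (List (String × String)) → Option (List (String × String))
  | [] => none
  | m :: rest => if pvIsSub m then some m else pvScanSub rest

def pick_leader_py (members : List (List (String × String))) : List (String × String) :=
  match pvScanSubMac members with
  | some m => m
  | none =>
    match pvScanSub members with
    | some m => m
    | none => match members with
      | [] => []
      | m :: _ => m

-- ===== PORT B =====
-- B's rank: 0 unless subscription, then 2 on a mac else 1 (dict lookups written out as in Source B)
def pvRank (m : List (String × String)) : Int :=
  if ¬ ((PySem.Dict.mk m).get? "experience_level" == some "subscription") then 0
  else if PySem.Str.lower ((PySem.Dict.mk m).getD "os" "") == "mac" then 2 else 1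

-- Python's max(ms, key=rank): foldl keeping the earlier element on ties (strict > to replace)
def pick_leader_py_alt (members : List (List (String × String))) : List (String × String) :=
  match members with
  | [] => []
  | m :: rest => rest.foldl (fun best x => if pvRank best < pvRank x then x else best) m

-- ===== PRECONDITION & SPEC =====
def Spec_pick_leader_py (members : List (List (String × String))) (out : List (String × String)) : Prop := out = pick_leader_py_alt members
instance (members : List (List (String × String))) (out : List (String × String)) : Decidable (Spec_pick_leader_py members out) := by unfold Spec_pick_leader_py; infer_instance

-- ===== CLAIM (what is proved, stated in full; the proofs are below) =====
def Claim_equal_pick_leader_py : Prop := ∀ (members : List (List (String × String))), Dom_pick_leader_py members → Spec_pick_leader_py members (pick_leader_py members)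

-- ===== LEMMAS AND PROOFS =====
theorem pvRank_eq (m : List (String × String)) :
    pvRank m = if pvIsSub m then (if pvIsMac m then 2 else 1) else 0 := by
  simp only [pvRank, pvIsSub, pvIsMac]
  split_ifs <;> simp_all

theorem pvRank_cases (m : List (String × String)) :
    pvRank m = 0 ∨ pvRank m = 1 ∨ pvRank m = 2 := by
  rw [pvRank_eq]; split_ifs <;> simp

-- Characterisation of B's fold in terms of A's scans and the rank of the accumulator.
theorem pvFold_eq (xs : List (List (String × String))) (b : List (String × String)) :
    xs.foldl (fun best x => if pvRank best < pvRank x then x else best) b =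
      if pvRank b = 2 then b
      else match pvScanSubMac xs with
        | some m => m
        | none =>
          if pvRank b = 1 then b
          else match pvScanSub xs with
            | some m => m
            | none => b := by
  induction xs generalizing b with
  | nil => split_ifs <;> rfl
  | cons x rest ih =>
    have hx := pvRank_eq x
    by_cases hs : pvIsSub x = true <;> by_cases hm : pvIsMac x = true <;>
      simp only [hs, hm] at hx <;> norm_num at hx <;>
      simp only [List.foldl_cons, ih, pvScanSubMac, pvScanSub, hs, hm, hx,
        Bool.and_self, Bool.and_false, Bool.false_and] <;>
      rcases pvRank_cases b with hb | hb | hb <;>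
      simp only [hb] <;>
      cases hsc : pvScanSubMac rest <;> cases hss : pvScanSub rest <;>
      simp [hx, hb]

-- ===== VERDICT (by name: the statement is the Claim_ definition above) =====
theorem pick_leader_py_spec : Claim_equal_pick_leader_py := by
  intro members _
  unfold Spec_pick_leader_py pick_leader_py pick_leader_py_alt
  cases members with
  | nil => rfl
  | cons m rest =>
    dsimp only
    rw [pvFold_eq]
    simp only [pvScanSubMac, pvScanSub]
    by_cases hs : pvIsSub m = true <;> by_cases hm : pvIsMac m = true <;>
      simp_all [pvRank_eq]
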